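-- pv_equiv track=rewrite | github.com/yazanai20059-sys/Python | ejercici 48.py | esta_ordenada
-- ===== SOURCE A (Python) =====
-- def esta_ordenada(llista):
--     """
--     Determina si una llista està ordenada de forma ascendent, descendent o no està ordenada.
--
--     Args:
--         llista: Llista de números a comprovar
--
--     Returns:
--         str: Missatge indicant l'estat d'ordenació
--     """
--     if len(llista) <= 1:
--         return "està ordenada de forma ascendent"
--
--     # Comprovem si està ordenada ascendent
--     ascendent = True
--     for i in range(len(llista) - 1):
--         if llista[i] > llista[i + 1]:
--             ascendent = False
--             break
--
--     if ascendent: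
--         return "està ordenada de forma ascendent"
--
--     # Comprovem si està ordenada descendent
--     descendent = True
--     for i in range(len(llista) - 1):
--         if llista[i] < llista[i + 1]:
--             descendent = False
--             break
--
--     if descendent:
--         return "està ordenada de forma descendent"
--
--     return "no està ordenada"
-- ===== SOURCE B (Python) =====
-- def esta_ordenada(llista):
--     # Single pass over adjacent pairs maintaining both flags at once.
--     ascendent = True
--     descendent = True
--     for a, b in zip(llista, llista[1:]):
--         if a > b:
--             ascendent = False
--         if a < b:
--             descendent = False
--     if ascendent:
--         return "està ordenada de forma ascendent"
--     if descendent: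
--         return "està ordenada de forma descendent"
--     return "no està ordenada"
-- ===== Notes on version B (the rewrite author's own statement) =====
-- stated objective: simpler
-- what changed: Replaces the length guard plus two separate early-exit scans with one pass over adjacent pairs that maintains both ascending and descending flags simultaneously; the len<=1 guard is subsumed since short lists leave both flags True and ascending is checked first.
import Mathlib
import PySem

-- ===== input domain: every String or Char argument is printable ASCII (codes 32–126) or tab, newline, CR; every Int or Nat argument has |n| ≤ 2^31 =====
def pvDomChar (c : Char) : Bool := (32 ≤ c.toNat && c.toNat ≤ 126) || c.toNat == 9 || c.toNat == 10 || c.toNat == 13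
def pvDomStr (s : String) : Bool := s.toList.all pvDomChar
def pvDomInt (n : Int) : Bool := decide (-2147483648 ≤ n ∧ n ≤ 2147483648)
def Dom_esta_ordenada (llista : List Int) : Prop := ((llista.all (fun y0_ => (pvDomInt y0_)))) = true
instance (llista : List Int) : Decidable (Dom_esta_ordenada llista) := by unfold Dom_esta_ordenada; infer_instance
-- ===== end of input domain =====

-- B replaces the length guard and two separate early-exit scans with one pass over
-- adjacent pairs that maintains both flags simultaneously (simpler decomposition).


-- ===== PORT A =====
-- first loop: scan for a pair with llista[i] > llista[i+1], breaking on the first one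
def pvChkAsc : List Int → Bool
  | a :: b :: t => if a > b then false else pvChkAsc (b :: t)
  | _ => true

-- second loop: scan for a pair with llista[i] < llista[i+1], breaking on the first one
def pvChkDesc : List Int → Bool
  | a :: b :: t => if a < b then false else pvChkDesc (b :: t)
  | _ => true

def esta_ordenada (llista : List Int) : String :=
  if llista.length ≤ 1 then "està ordenada de forma ascendent"
  else if pvChkAsc llista then "està ordenada de forma ascendent"
  else if pvChkDesc llista then "està ordenada de forma descendent"
  else "no està ordenada"

-- ===== PORT B =====
-- single pass over adjacent pairs, maintaining (ascendent, descendent) together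
def pvFlags : List Int → Bool × Bool
  | a :: b :: t =>
    let p := pvFlags (b :: t)
    (p.1 && !(a > b), p.2 && !(a < b))
  | _ => (true, true)

def esta_ordenada_alt (llista : List Int) : String :=
  let p := pvFlags llista
  if p.1 then "està ordenada de forma ascendent"
  else if p.2 then "està ordenada de forma descendent"
  else "no està ordenada"

-- ===== PRECONDITION & SPEC =====
def Spec_esta_ordenada (llista : List Int) (out : String) : Prop := out = esta_ordenada_alt llista
instance (llista : List Int) (out : String) : Decidable (Spec_esta_ordenada llista out) := by unfold Spec_esta_ordenada; infer_instance

-- ===== CLAIM (what is proved, stated in full; the proofs are below) =====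
def Claim_equal_esta_ordenada : Prop := ∀ (llista : List Int), Dom_esta_ordenada llista → Spec_esta_ordenada llista (esta_ordenada llista)

-- ===== LEMMAS AND PROOFS =====
theorem pvFlags_eq (l : List Int) : pvFlags l = (pvChkAsc l, pvChkDesc l) := by
  induction l with
  | nil => rfl
  | cons a t ih =>
    cases t with
    | nil => rfl
    | cons b t' =>
      simp only [pvFlags, pvChkAsc, pvChkDesc, ih]
      apply Prod.ext <;> simp only [] <;> split_ifs <;> simp_all

-- ===== VERDICT (by name: the statement is the Claim_ definition above) =====
theorem esta_ordenada_spec : Claim_equal_esta_ordenada := by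
  intro llista _
  show esta_ordenada llista = esta_ordenada_alt llista
  unfold esta_ordenada esta_ordenada_alt
  rw [pvFlags_eq]
  match llista with
  | [] => rfl
  | [_] => rfl
  | a :: b :: t =>
    simp only [List.length_cons, pvChkAsc, pvChkDesc]
    split_ifs <;> simp_all
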